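-- pv_equiv track=rewrite | github.com/vntayemm/JackNguyen-Fullstack-Engineer-Leader | backend/scripts/dns_individual.py | detect_dns_provider
-- ===== SOURCE A (Python) =====
-- def detect_dns_provider(ns_records):
--     """Detect DNS provider based on NS records"""
--     if not ns_records:
--         return "Unknown"
--
--     ns_lower = [ns.lower() for ns in ns_records]
--
--     if any('cloudflare' in ns for ns in ns_lower):
--         return "Cloudflare"
--     elif any('awsdns' in ns for ns in ns_lower) or any('route53' in ns for ns in ns_lower):
--         return "Amazon Route 53"
--     elif any('google' in ns for ns in ns_lower):
--         return "Google Cloud DNS"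
--     elif any('azure' in ns for ns in ns_lower):
--         return "Microsoft Azure DNS"
--     elif any('godaddy' in ns for ns in ns_lower):
--         return "GoDaddy"
--     elif any('namecheap' in ns for ns in ns_lower):
--         return "Namecheap"
--     elif any('tucows' in ns for ns in ns_lower):
--         return "Tucows Inc."
--     elif any('dnsimple' in ns for ns in ns_lower):
--         return "DNSimple"
--     elif any('dyn' in ns for ns in ns_lower):
--         return "Dyn"
--     elif any('ns1.com' in ns for ns in ns_lower):
--         return "NS1"
--     elif any('systemdns' in ns for ns in ns_lower):
--         return "SystemDNS"
--     elif any('name.com' in ns for ns in ns_lower):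
--         return "Name.com"
--     elif any('hover' in ns for ns in ns_lower):
--         return "Hover"
--     elif any('porkbun' in ns for ns in ns_lower):
--         return "Porkbun"
--     elif any('namesilo' in ns for ns in ns_lower):
--         return "NameSilo"
--     elif any('ionos' in ns for ns in ns_lower):
--         return "IONOS"
--     elif any('hostinger' in ns for ns in ns_lower):
--         return "Hostinger"
--     elif any('bluehost' in ns for ns in ns_lower):
--         return "Bluehost"
--     elif any('hostgator' in ns for ns in ns_lower):
--         return "HostGator"
--     elif any('dreamhost' in ns for ns in ns_lower):
--         return "DreamHost"
--     elif any('inmotion' in ns for ns in ns_lower):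
--         return "InMotion Hosting"
--     elif any('a2hosting' in ns for ns in ns_lower):
--         return "A2 Hosting"
--     elif any('siteground' in ns for ns in ns_lower):
--         return "SiteGround"
--     elif any('wpengine' in ns for ns in ns_lower):
--         return "WP Engine"
--     elif any('kinsta' in ns for ns in ns_lower):
--         return "Kinsta"
--     elif any('digitalocean' in ns for ns in ns_lower):
--         return "DigitalOcean"
--     elif any('linode' in ns for ns in ns_lower):
--         return "Linode"
--     elif any('vultr' in ns for ns in ns_lower):
--         return "Vultr"
--     elif any('ovh' in ns for ns in ns_lower):
--         return "OVH"
--     elif any('hetzner' in ns for ns in ns_lower):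
--         return "Hetzner"
--     else:
--         # Try to extract provider name from NS records
--         for ns in ns_lower:
--             if '.' in ns:
--                 parts = ns.split('.')
--                 if len(parts) >= 2:
--                     provider = parts[-2]  # Get the second-to-last part
--                     if provider not in ['ns', 'dns', 'name']:
--                         return provider.replace('-', ' ').title()
--         return "Unknown"
-- ===== SOURCE B (Python) =====
-- # Single-pass re-implementation: one walk over the records, tracking the
-- # highest-priority keyword hit (min index into a flat priority list) and the
-- # first fallback candidate, instead of A's 30 staged any()-scans.
-- KEYWORDS = [
--     ("cloudflare", "Cloudflare"),
--     ("awsdns", "Amazon Route 53"),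
--     ("route53", "Amazon Route 53"),
--     ("google", "Google Cloud DNS"),
--     ("azure", "Microsoft Azure DNS"),
--     ("godaddy", "GoDaddy"),
--     ("namecheap", "Namecheap"),
--     ("tucows", "Tucows Inc."),
--     ("dnsimple", "DNSimple"),
--     ("dyn", "Dyn"),
--     ("ns1.com", "NS1"),
--     ("systemdns", "SystemDNS"),
--     ("name.com", "Name.com"),
--     ("hover", "Hover"),
--     ("porkbun", "Porkbun"),
--     ("namesilo", "NameSilo"),
--     ("ionos", "IONOS"),
--     ("hostinger", "Hostinger"),
--     ("bluehost", "Bluehost"),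
--     ("hostgator", "HostGator"),
--     ("dreamhost", "DreamHost"),
--     ("inmotion", "InMotion Hosting"),
--     ("a2hosting", "A2 Hosting"),
--     ("siteground", "SiteGround"),
--     ("wpengine", "WP Engine"),
--     ("kinsta", "Kinsta"),
--     ("digitalocean", "DigitalOcean"),
--     ("linode", "Linode"),
--     ("vultr", "Vultr"),
--     ("ovh", "OVH"),
--     ("hetzner", "Hetzner"),
-- ]
--
--
-- def _first_kw(ns):
--     """Index of the first (highest-priority) keyword contained in ns, or None."""
--     for i, (kw, _label) in enumerate(KEYWORDS):
--         if kw in ns: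
--             return i
--     return None
--
--
-- def _fallback_candidate(ns):
--     """Fallback provider name extracted from one record, or None."""
--     if '.' in ns:
--         parts = ns.split('.')
--         if len(parts) >= 2:
--             provider = parts[-2]
--             if provider not in ('ns', 'dns', 'name'):
--                 return provider.replace('-', ' ').title()
--     return None
--
--
-- def detect_dns_provider(ns_records):
--     """Detect DNS provider based on NS records (single pass with accumulators)."""
--     if not ns_records:
--         return "Unknown"
--     best = None
--     fb = None
--     for ns in ns_records:
--         ns = ns.lower()
--         i = _first_kw(ns)
--         if i is not None and (best is None or i < best):
--             best = i
--         if fb is None: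
--             fb = _fallback_candidate(ns)
--     if best is not None:
--         return KEYWORDS[best][1]
--     return fb if fb is not None else "Unknown"
-- ===== Notes on version B (the rewrite author's own statement) =====
-- stated objective: alternative
-- what changed: Instead of A's 30 staged any()-scans over the whole list (keyword-major), B makes a single record-major pass: for each record it finds its first match in a flat priority list and keeps the minimum index across records, and it collects the first fallback candidate in the same pass.
import Mathlib
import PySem

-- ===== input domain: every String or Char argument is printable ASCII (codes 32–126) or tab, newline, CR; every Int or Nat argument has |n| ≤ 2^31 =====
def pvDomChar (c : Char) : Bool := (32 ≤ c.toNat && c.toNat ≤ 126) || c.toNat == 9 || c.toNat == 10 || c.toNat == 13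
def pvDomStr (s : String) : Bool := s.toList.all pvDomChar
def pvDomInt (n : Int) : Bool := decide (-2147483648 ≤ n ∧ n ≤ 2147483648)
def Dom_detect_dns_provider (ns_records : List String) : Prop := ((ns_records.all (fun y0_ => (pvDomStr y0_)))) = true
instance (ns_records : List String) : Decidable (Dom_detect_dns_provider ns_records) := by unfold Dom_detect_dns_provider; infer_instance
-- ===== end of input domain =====

-- B replaces A's 30 staged any()-scans with ONE record-major pass keeping the minimum
-- priority index and the first fallback candidate (alternative decomposition, same result).

-- shared helper: str.title() for the ASCII domain — a letter after a non-letter is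
-- uppercased, a letter after a letter is lowercased (exact on ASCII, where the cased
-- characters are exactly the letters); other characters pass through unchanged.
def pvTitleChars : Bool → List Char → List Char
  | _, [] => []
  | prevCased, c :: rest =>
    if PySem.Chars.isalpha c then
      (if prevCased then PySem.Chars.lowerChar c else PySem.Chars.upperChar c) :: pvTitleChars true rest
    else c :: pvTitleChars false rest

def pvTitle (s : String) : String := String.ofList (pvTitleChars false s.toList)

-- ===== PORT A =====
-- A's fallback loop: for ns in ns_lower: if '.' in ns: parts = ns.split('.');
-- if len(parts) >= 2: provider = parts[-2]; if provider not in [...]: return …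
def pvFallback : List String → String
  | [] => "Unknown"
  | ns :: rest =>
    if PySem.Str.isIn "." ns then
      let parts := (PySem.Str.split? ns ".").getD []   -- ns.split('.'); sep "." ≠ "" so split? is always some
      if parts.length ≥ 2 then
        let provider := PySem.List.pyGetD parts (-2) ""   -- parts[-2], guarded by len ≥ 2
        if provider ∈ ["ns", "dns", "name"] then pvFallback rest
        else pvTitle (PySem.Str.replace provider "-" " ")
      else pvFallback rest
    else pvFallback rest

def detect_dns_provider (ns_records : List String) : String :=
  if ns_records = [] then "Unknown"
  else
    let nsLower := ns_records.map PySem.Str.lower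
    if (nsLower.any (fun ns => PySem.Str.isIn "cloudflare" ns)) then "Cloudflare"
    else if (nsLower.any (fun ns => PySem.Str.isIn "awsdns" ns) || nsLower.any (fun ns => PySem.Str.isIn "route53" ns)) then "Amazon Route 53"
    else if (nsLower.any (fun ns => PySem.Str.isIn "google" ns)) then "Google Cloud DNS"
    else if (nsLower.any (fun ns => PySem.Str.isIn "azure" ns)) then "Microsoft Azure DNS"
    else if (nsLower.any (fun ns => PySem.Str.isIn "godaddy" ns)) then "GoDaddy"
    else if (nsLower.any (fun ns => PySem.Str.isIn "namecheap" ns)) then "Namecheap"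
    else if (nsLower.any (fun ns => PySem.Str.isIn "tucows" ns)) then "Tucows Inc."
    else if (nsLower.any (fun ns => PySem.Str.isIn "dnsimple" ns)) then "DNSimple"
    else if (nsLower.any (fun ns => PySem.Str.isIn "dyn" ns)) then "Dyn"
    else if (nsLower.any (fun ns => PySem.Str.isIn "ns1.com" ns)) then "NS1"
    else if (nsLower.any (fun ns => PySem.Str.isIn "systemdns" ns)) then "SystemDNS"
    else if (nsLower.any (fun ns => PySem.Str.isIn "name.com" ns)) then "Name.com"
    else if (nsLower.any (fun ns => PySem.Str.isIn "hover" ns)) then "Hover"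
    else if (nsLower.any (fun ns => PySem.Str.isIn "porkbun" ns)) then "Porkbun"
    else if (nsLower.any (fun ns => PySem.Str.isIn "namesilo" ns)) then "NameSilo"
    else if (nsLower.any (fun ns => PySem.Str.isIn "ionos" ns)) then "IONOS"
    else if (nsLower.any (fun ns => PySem.Str.isIn "hostinger" ns)) then "Hostinger"
    else if (nsLower.any (fun ns => PySem.Str.isIn "bluehost" ns)) then "Bluehost"
    else if (nsLower.any (fun ns => PySem.Str.isIn "hostgator" ns)) then "HostGator"
    else if (nsLower.any (fun ns => PySem.Str.isIn "dreamhost" ns)) then "DreamHost"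
    else if (nsLower.any (fun ns => PySem.Str.isIn "inmotion" ns)) then "InMotion Hosting"
    else if (nsLower.any (fun ns => PySem.Str.isIn "a2hosting" ns)) then "A2 Hosting"
    else if (nsLower.any (fun ns => PySem.Str.isIn "siteground" ns)) then "SiteGround"
    else if (nsLower.any (fun ns => PySem.Str.isIn "wpengine" ns)) then "WP Engine"
    else if (nsLower.any (fun ns => PySem.Str.isIn "kinsta" ns)) then "Kinsta"
    else if (nsLower.any (fun ns => PySem.Str.isIn "digitalocean" ns)) then "DigitalOcean"
    else if (nsLower.any (fun ns => PySem.Str.isIn "linode" ns)) then "Linode"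
    else if (nsLower.any (fun ns => PySem.Str.isIn "vultr" ns)) then "Vultr"
    else if (nsLower.any (fun ns => PySem.Str.isIn "ovh" ns)) then "OVH"
    else if (nsLower.any (fun ns => PySem.Str.isIn "hetzner" ns)) then "Hetzner"
    else pvFallback nsLower

-- ===== PORT B =====
-- flat priority list KEYWORDS of Source B (Amazon's two keywords are separate adjacent entries)
def pvFlat : List (String × String) := [
  ("cloudflare", "Cloudflare"),
  ("awsdns", "Amazon Route 53"),
  ("route53", "Amazon Route 53"),
  ("google", "Google Cloud DNS"),
  ("azure", "Microsoft Azure DNS"),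
  ("godaddy", "GoDaddy"),
  ("namecheap", "Namecheap"),
  ("tucows", "Tucows Inc."),
  ("dnsimple", "DNSimple"),
  ("dyn", "Dyn"),
  ("ns1.com", "NS1"),
  ("systemdns", "SystemDNS"),
  ("name.com", "Name.com"),
  ("hover", "Hover"),
  ("porkbun", "Porkbun"),
  ("namesilo", "NameSilo"),
  ("ionos", "IONOS"),
  ("hostinger", "Hostinger"),
  ("bluehost", "Bluehost"),
  ("hostgator", "HostGator"),
  ("dreamhost", "DreamHost"),
  ("inmotion", "InMotion Hosting"),
  ("a2hosting", "A2 Hosting"),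
  ("siteground", "SiteGround"),
  ("wpengine", "WP Engine"),
  ("kinsta", "Kinsta"),
  ("digitalocean", "DigitalOcean"),
  ("linode", "Linode"),
  ("vultr", "Vultr"),
  ("ovh", "OVH"),
  ("hetzner", "Hetzner")]

-- _first_kw: for i, (kw, _) in enumerate(KEYWORDS): if kw in ns: return i; return None
def pvFirstKwAux (ns : String) : Nat → List (String × String) → Option Nat
  | _, [] => none
  | i, (kw, _) :: rest => if PySem.Str.isIn kw ns then some i else pvFirstKwAux ns (i + 1) rest

-- _fallback_candidate(ns)
def pvCand (ns : String) : Option String :=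
  if PySem.Str.isIn "." ns then
    let parts := (PySem.Str.split? ns ".").getD []   -- sep "." ≠ "" so split? is always some
    if parts.length ≥ 2 then
      let provider := PySem.List.pyGetD parts (-2) ""   -- parts[-2], guarded by len ≥ 2
      if provider ∈ ["ns", "dns", "name"] then none
      else some (pvTitle (PySem.Str.replace provider "-" " "))
    else none
  else none

-- the two accumulator updates of the loop body (independent components)
def pvBestStep (best : Option Nat) (ns : String) : Option Nat :=
  match pvFirstKwAux ns 0 pvFlat, best with
  | some i, none => some i
  | some i, some b => if i < b then some i else best
  | none, _ => best

def pvFbStep (fb : Option String) (ns : String) : Option String :=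
  match fb with
  | none => pvCand ns
  | some c => some c

def detect_dns_provider_alt (ns_records : List String) : String :=
  if ns_records = [] then "Unknown"
  else
    let st := ns_records.foldl
      (fun st ns =>
        let ns := PySem.Str.lower ns
        (pvBestStep st.1 ns, pvFbStep st.2 ns))
      ((none : Option Nat), (none : Option String))
    match st.1 with
    | some j => (pvFlat.getD j ("", "")).2   -- KEYWORDS[best][1]; best is an enumerate index, always in range
    | none => st.2.getD "Unknown"

-- ===== PRECONDITION & SPEC =====
def Spec_detect_dns_provider (ns_records : List String) (out : String) : Prop := out = detect_dns_provider_alt ns_records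
instance (ns_records : List String) (out : String) : Decidable (Spec_detect_dns_provider ns_records out) := by unfold Spec_detect_dns_provider; infer_instance

-- ===== CLAIM =====
def Claim_equal_detect_dns_provider : Prop := ∀ (ns_records : List String), Dom_detect_dns_provider ns_records → Spec_detect_dns_provider ns_records (detect_dns_provider ns_records)

-- ===== LEMMAS AND PROOFS =====

-- if (a || b) then x else y splits into two nested ifs (for A's Amazon branch)
theorem pvIfOr (a b : Bool) (x y : String) :
    (if (a || b) then x else y) = if a then x else if b then x else y := by
  cases a <;> cases b <;> simp

-- the keyword-major chain over an arbitrary priority table (common normal form)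
def pvScanWith (l : List String) (fb : String) : List (String × String) → String
  | [] => fb
  | (kw, lab) :: rest =>
    if l.any (fun ns => PySem.Str.isIn kw ns) then lab
    else pvScanWith l fb rest

theorem pvScanWith_cons (l : List String) (fb kw lab : String) (t : List (String × String)) :
    pvScanWith l fb ((kw, lab) :: t) =
      if l.any (fun ns => PySem.Str.isIn kw ns) then lab else pvScanWith l fb t := by
  simp [pvScanWith]

-- pvMin view of pvBestStep's generic core
def pvMin (b v : Option Nat) : Option Nat :=
  match v, b with
  | some i, none => some i
  | some i, some b' => if i < b' then some i else b
  | none, _ => b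

theorem pvMin_some_zero_right (b : Option Nat) : pvMin b (some 0) = some 0 := by
  cases b with
  | none => rfl
  | some k => by_cases h : 0 < k <;> simp [pvMin, h] <;> omega

theorem pvMin_some_zero_left (v : Option Nat) : pvMin (some 0) v = some 0 := by
  cases v <;> simp [pvMin]

theorem foldl_pvMin_stays_zero (v : String → Option Nat) (l : List String) :
    l.foldl (fun b ns => pvMin b (v ns)) (some 0) = some 0 := by
  induction l with
  | nil => rfl
  | cons ns rest ih => simp [List.foldl_cons, pvMin_some_zero_left, ih]

theorem foldl_pvMin_zero (v : String → Option Nat) (l : List String) (acc : Option Nat)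
    (h : ∃ ns ∈ l, v ns = some 0) :
    l.foldl (fun b ns => pvMin b (v ns)) acc = some 0 := by
  induction l generalizing acc with
  | nil => simp at h
  | cons hd rest ih =>
    rcases h with ⟨ns, hm, hv⟩
    rcases List.mem_cons.mp hm with rfl | hm
    · simp [List.foldl_cons, hv, pvMin_some_zero_right, foldl_pvMin_stays_zero]
    · exact ih _ ⟨ns, hm, hv⟩

theorem pvMin_shift (b v : Option Nat) :
    pvMin (b.map (· + 1)) (v.map (· + 1)) = (pvMin b v).map (· + 1) := by
  cases b <;> cases v <;> simp [pvMin] <;> split_ifs <;> simp <;> omega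

theorem foldl_pvMin_shift (v : String → Option Nat) (l : List String) (acc : Option Nat) :
    l.foldl (fun b ns => pvMin b ((v ns).map (· + 1))) (acc.map (· + 1)) =
      (l.foldl (fun b ns => pvMin b (v ns)) acc).map (· + 1) := by
  induction l generalizing acc with
  | nil => rfl
  | cons hd rest ih => simp only [List.foldl_cons, pvMin_shift, ih]

theorem pvBestStep_eq (b : Option Nat) (ns : String) :
    pvBestStep b ns = pvMin b (pvFirstKwAux ns 0 pvFlat) := by
  unfold pvBestStep pvMin
  cases pvFirstKwAux ns 0 pvFlat <;> cases b <;> simp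

theorem pvFirstKwAux_shift (ns : String) (t : List (String × String)) (i : Nat) :
    pvFirstKwAux ns i t = (pvFirstKwAux ns 0 t).map (· + i) := by
  induction t generalizing i with
  | nil => rfl
  | cons p rest ih =>
    obtain ⟨kw, lab⟩ := p
    by_cases h : PySem.Str.isIn kw ns
    · rw [pvFirstKwAux, pvFirstKwAux, if_pos h, if_pos h]
      simp
    · rw [pvFirstKwAux, pvFirstKwAux, if_neg h, if_neg h, ih (i + 1), ih 1,
        Option.map_map]
      congr 1
      funext j
      simp
      omega

theorem pvFirstKwAux_cons (ns kw lab : String) (t : List (String × String)) :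
    pvFirstKwAux ns 0 ((kw, lab) :: t) =
      if PySem.Str.isIn kw ns then some 0 else (pvFirstKwAux ns 0 t).map (· + 1) := by
  by_cases h : PySem.Str.isIn kw ns
  · rw [pvFirstKwAux, if_pos h, if_pos h]
  · rw [pvFirstKwAux, if_neg h, pvFirstKwAux_shift, if_neg h]

-- B's best-fold rendered over table t equals the keyword-major chain over t
theorem pvFold_eq_scan (t : List (String × String)) (l : List String) (fb : String) :
    (match l.foldl (fun b ns => pvMin b (pvFirstKwAux ns 0 t)) none with
      | some j => (t.getD j ("", "")).2
      | none => fb) = pvScanWith l fb t := by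
  induction t generalizing fb with
  | nil =>
    have : l.foldl (fun b ns => pvMin b (pvFirstKwAux ns 0 ([] : List (String × String)))) none = none := by
      induction l with
      | nil => rfl
      | cons hd rest ih => simpa [pvFirstKwAux, pvMin] using ih
    simp [this, pvScanWith]
  | cons p rest ih =>
    obtain ⟨kw, lab⟩ := p
    rw [pvScanWith_cons]
    by_cases h : l.any (fun ns => PySem.Str.isIn kw ns)
    · rcases List.any_eq_true.mp h with ⟨ns, hm, hkw⟩
      have hz : ∃ ns ∈ l, pvFirstKwAux ns 0 ((kw, lab) :: rest) = some 0 :=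
        ⟨ns, hm, by rw [pvFirstKwAux_cons, if_pos hkw]⟩
      rw [foldl_pvMin_zero _ _ _ hz, if_pos h]
      simp
    · have hnone : ∀ ns ∈ l, ¬ PySem.Str.isIn kw ns = true := by
        intro ns hm; exact fun hk => h (List.any_eq_true.mpr ⟨ns, hm, hk⟩)
      have hcongr : l.foldl (fun b ns => pvMin b (pvFirstKwAux ns 0 ((kw, lab) :: rest))) none =
          l.foldl (fun b ns => pvMin b ((pvFirstKwAux ns 0 rest).map (· + 1))) none := by
        apply PySem.List.foldl_congr_mem
        intro acc ns hm
        rw [pvFirstKwAux_cons, if_neg (hnone ns hm)]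
      have hshift := foldl_pvMin_shift (fun ns => pvFirstKwAux ns 0 rest) l none
      simp only [Option.map_none] at hshift
      rw [hcongr, hshift, if_neg h, ← ih fb]
      cases l.foldl (fun b ns => pvMin b (pvFirstKwAux ns 0 rest)) none with
      | none => rfl
      | some j => simp

-- the pair fold splits into two independent folds
theorem pvPairFold (l : List String) (a : Option Nat) (b : Option String) :
    l.foldl (fun st ns =>
        let ns := PySem.Str.lower ns
        (pvBestStep st.1 ns, pvFbStep st.2 ns)) (a, b) =
      ((l.map PySem.Str.lower).foldl pvBestStep a, (l.map PySem.Str.lower).foldl pvFbStep b) := by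
  induction l generalizing a b with
  | nil => rfl
  | cons hd rest ih => simp [List.foldl_cons, ih]

theorem foldl_pvFbStep_some (l : List String) (c : String) :
    l.foldl pvFbStep (some c) = some c := by
  induction l with
  | nil => rfl
  | cons hd rest ih => simpa [pvFbStep] using ih

-- A's fallback recursion equals B's first-candidate fold
theorem pvFallback_cons (ns : String) (rest : List String) :
    pvFallback (ns :: rest) =
      match pvCand ns with
      | some c => c
      | none => pvFallback rest := by
  simp only [pvFallback, pvCand]
  split_ifs <;> rfl

theorem pvFallback_eq_fold (l : List String) :
    pvFallback l = (l.foldl pvFbStep none).getD "Unknown" := by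
  induction l with
  | nil => rfl
  | cons ns rest ih =>
    rw [List.foldl_cons, pvFallback_cons]
    cases hc : pvCand ns with
    | none => simpa [pvFbStep, hc] using ih
    | some c => simp [pvFbStep, hc, foldl_pvFbStep_some]

-- ===== VERDICT =====
theorem detect_dns_provider_spec : Claim_equal_detect_dns_provider := by
  intro ns_records _
  unfold Spec_detect_dns_provider detect_dns_provider detect_dns_provider_alt
  by_cases hemp : ns_records = []
  · simp [hemp]
  · rw [if_neg hemp, if_neg hemp]
    simp only [pvPairFold]
    have hbest : ((ns_records.map PySem.Str.lower).foldl pvBestStep none) =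
        (ns_records.map PySem.Str.lower).foldl
          (fun b ns => pvMin b (pvFirstKwAux ns 0 pvFlat)) none := by
      apply PySem.List.foldl_congr_mem
      intro acc x _
      exact pvBestStep_eq acc x
    rw [hbest, pvFallback_eq_fold,
      pvFold_eq_scan pvFlat (ns_records.map PySem.Str.lower)
        (((ns_records.map PySem.Str.lower).foldl pvFbStep none).getD "Unknown")]
    simp only [pvFlat, pvScanWith_cons, pvScanWith]
    rw [pvIfOr]
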